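-- pv_equiv track=rewrite | github.com/8Penny/stepik_tasks | tree_depth.py | get_max_deep
-- ===== SOURCE A (Python) =====
-- def get_max_deep(tree):
--     help = []
--     for j in range(0, len(tree)):
--         help.append([])
--     for i in range(0, len(tree)):
--         if tree[i] == -1:
--             root = i
--             continue
--         help[tree[i]].append(i)
--
--     children = help[root]
--     depth = 1
--     while children:
--         children2 = []
--         depth += 1
--         while children:
--             children2 += help[children.pop()]
--         children = children2
--
--     return depth
-- ===== SOURCE B (Python) =====
-- def get_max_deep(tree):
--     children = [[] for _ in tree]
--     for i, p in enumerate(tree):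
--         if p == -1:
--             root = i
--         else:
--             children[p].append(i)
--     best = 0
--     stack = [(root, 1)]
--     while stack:
--         node, depth = stack.pop()
--         if depth > best:
--             best = depth
--         for c in children[node]:
--             stack.append((c, depth + 1))
--     return best
-- ===== Notes on version B (the rewrite author's own statement) =====
-- stated objective: alternative
-- what changed: A counts tree depth by repeatedly expanding whole BFS frontier lists and incrementing a level counter; B keeps the children table but replaces the level-order frontier counting with an explicit-stack depth-first traversal carrying (node, depth) pairs and returning the running maximum depth.
import Mathlib
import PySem

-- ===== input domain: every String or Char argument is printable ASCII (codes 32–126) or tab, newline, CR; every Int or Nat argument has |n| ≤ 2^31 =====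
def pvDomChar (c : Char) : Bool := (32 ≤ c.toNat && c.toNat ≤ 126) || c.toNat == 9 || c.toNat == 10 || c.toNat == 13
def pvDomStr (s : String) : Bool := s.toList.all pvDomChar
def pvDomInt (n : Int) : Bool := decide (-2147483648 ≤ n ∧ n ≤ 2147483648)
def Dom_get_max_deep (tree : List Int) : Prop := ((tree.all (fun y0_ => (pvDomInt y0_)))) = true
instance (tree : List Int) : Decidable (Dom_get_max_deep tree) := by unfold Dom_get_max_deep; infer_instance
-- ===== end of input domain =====

-- B replaces A's level-order frontier counting by an explicit-stack depth-first traversal of the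
-- same children table, keeping a running maximum depth (alternative algorithm, same return value
-- on Pre_; neither claimed faster).

-- ===== PORT A =====
-- 'help = []; for j in range(0, len(tree)): help.append([])'
def pvInitHelp (n : Nat) : List (List Int) :=
  (List.range n).foldl (fun h _ => h ++ [([] : List Int)]) []

-- one step of A's construction loop: 'if tree[i] == -1: root = i; continue' / 'help[tree[i]].append(i)'
-- (Python indexing via pyGet?/pySetD: a negative tree[i] wraps; an out-of-range one is an
--  IndexError, excluded by Pre_ — the port leaves the state unchanged there)
def pvBuildStep (tree : List Int) (st : List (List Int) × Option Nat) (i : Nat) :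
    List (List Int) × Option Nat :=
  if (PySem.List.pyGet? tree (i : Int)).getD 0 == -1 then (st.1, some i)
  else
    match PySem.List.pyGet? st.1 ((PySem.List.pyGet? tree (i : Int)).getD 0) with
    | none => st
    | some l =>
      (PySem.List.pySetD st.1 ((PySem.List.pyGet? tree (i : Int)).getD 0) (l ++ [(i : Int)]), st.2)

def pvBuildA (tree : List Int) : List (List Int) × Option Nat :=
  (List.range tree.length).foldl (pvBuildStep tree) (pvInitHelp tree.length, none)

-- inner while: 'while children: children2 += help[children.pop()]' — pop takes the LAST element
def pvLevelA (help : List (List Int)) (children : List Int) : List Int :=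
  children.reverse.foldl (fun acc x => acc ++ (PySem.List.pyGet? help x).getD []) []

-- outer while, made total by fuel (the call below passes len+1, never exhausted on inputs
-- admitted by Pre_ — proved below); Python's depth starts at 1 and only grows, kept as Nat
def pvBfsA (help : List (List Int)) : Nat → List Int → Nat → Nat
  | 0, _, depth => depth
  | fuel+1, children, depth =>
    if children.isEmpty then depth
    else pvBfsA help fuel (pvLevelA help children) (depth + 1)

def get_max_deep (tree : List Int) : Int :=
  match (pvBuildA tree).2 with
  | none => 0   -- Python raises UnboundLocalError ('root' unassigned); excluded by Pre_
  | some root =>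
    ((pvBfsA (pvBuildA tree).1 (tree.length + 1)
        ((PySem.List.pyGet? (pvBuildA tree).1 (root : Int)).getD []) 1 : Nat) : Int)

-- ===== PORT B =====
-- 'for i, p in enumerate(tree): if p == -1: root = i else: children[p].append(i)'
def pvBStep (st : List (List Int) × Option Int) (q : Int × Int) :
    List (List Int) × Option Int :=
  if q.2 == -1 then (st.1, some q.1)
  else
    match PySem.List.pyGet? st.1 q.2 with
    | none => st   -- IndexError on 'children[p]', excluded by Pre_
    | some l => (PySem.List.pySetD st.1 q.2 (l ++ [q.1]), st.2)

-- 'children = [[] for _ in tree]' then the enumerate loop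
def pvBuildB (tree : List Int) : List (List Int) × Option Int :=
  (PySem.List.enumerate tree 0).foldl pvBStep (tree.map (fun _ => ([] : List Int)), none)

-- 'while stack: node, depth = stack.pop(); ...' — Python pops from the tail of the list, so the
-- Lean stack keeps the top at its head: pop is a head match, append of a child is a cons (the
-- children are pushed by a foldl of cons, which puts the last child on top, exactly as Python)
def pvDfsB (children : List (List Int)) : Nat → List (Int × Nat) → Nat → Nat
  | 0, _, best => best
  | _+1, [], best => best
  | f+1, (node, d) :: rest, best =>
    pvDfsB children f
      (((PySem.List.pyGet? children node).getD []).foldl (fun st c => (c, d + 1) :: st) rest)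
      (if d > best then d else best)

def get_max_deep_alt (tree : List Int) : Int :=
  match (pvBuildB tree).2 with
  | none => 0   -- Python raises UnboundLocalError ('root' unassigned); excluded by Pre_
  | some root =>
    ((pvDfsB (pvBuildB tree).1 (tree.length + 1) [(root, 1)] 0 : Nat) : Int)

-- ===== PRECONDITION & SPEC =====
-- Pre_ excludes exactly the inputs where A raises: no -1 in tree (UnboundLocalError: 'root'
-- never assigned) or an element outside Python's index range [-len, len) (IndexError on
-- help[tree[i]]). A returns normally on every other input.
def Pre_get_max_deep (tree : List Int) : Prop :=
  (-1 : Int) ∈ tree ∧ ∀ x ∈ tree, -(tree.length : Int) ≤ x ∧ x < (tree.length : Int)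
instance (tree : List Int) : Decidable (Pre_get_max_deep tree) := by
  unfold Pre_get_max_deep; infer_instance

def pvWitness_get_max_deep : List Int := [-1, 0]

def Spec_get_max_deep (tree : List Int) (out : Int) : Prop := out = get_max_deep_alt tree
instance (tree : List Int) (out : Int) : Decidable (Spec_get_max_deep tree out) := by
  unfold Spec_get_max_deep; infer_instance

-- ===== CLAIM (what is proved, stated in full; the proofs are below) =====
def Claim_equal_get_max_deep : Prop :=
  ∀ (tree : List Int), Dom_get_max_deep tree → Pre_get_max_deep tree →
    Spec_get_max_deep tree (get_max_deep tree)

-- ===== LEMMAS AND PROOFS =====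

-- tree[i] for a Nat index i < len, as a total function
def pvT (tree : List Int) (i : Nat) : Int := tree.getD i 0

-- the Nat index Python's wraparound indexing denotes (valid for -n ≤ t < n)
def pvNormN (n : Nat) (t : Int) : Nat := if 0 ≤ t then t.toNat else n - (-t).toNat

-- parent of node i in the children table (none: i carries -1, no parent edge)
def pvPar? (tree : List Int) (i : Nat) : Option Nat :=
  if pvT tree i = -1 then none else some (pvNormN tree.length (pvT tree i))

-- fuel-bounded depth of node i counted from a base node r (r itself has depth 1)
def pvCh (tree : List Int) (r : Nat) : Nat → Nat → Option Nat
  | 0, i => if i = r then some 1 else none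
  | f+1, i =>
    if i = r then some 1 else
      (pvPar? tree i).bind (fun p => (pvCh tree r f p).map (· + 1))

def pvBVal (tree : List Int) (r : Nat) (i : Nat) : Nat := (pvCh tree r tree.length i).getD 0

-- the common value both programs compute: max over all nodes of their depth from r (≥ 1)
def pvM (tree : List Int) (r : Nat) : Nat :=
  (List.range tree.length).foldl (fun b i => max b (pvBVal tree r i)) 1

-- contents of A's help[j] after processing indices 0..k-1
def pvHelpL (tree : List Int) (k : Nat) (j : Nat) : List Int :=
  List.map Int.ofNat ((List.range k).filter (fun i => pvPar? tree i == some j))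

-- the descendants of i (nodes whose parent chain reaches i), as a finite set
def pvDesc (tree : List Int) (i : Nat) : Finset Nat :=
  (Finset.range tree.length).filter (fun j => (pvCh tree i tree.length j).isSome)

def pvSz (tree : List Int) (i : Nat) : Nat := (pvDesc tree i).card

-- the children of i, as a finite set
def pvCF (tree : List Int) (i : Nat) : Finset Nat :=
  ((List.range tree.length).filter (fun c => pvPar? tree c == some i)).toFinset

-- total remaining work of a DFS stack
def pvMeas (tree : List Int) (st : List (Int × Nat)) : Nat :=
  (st.map (fun e => pvSz tree e.1.toNat)).sum

-- a well-formed DFS stack entry: a node index with its depth from the root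
def pvOkE (tree : List Int) (r : Nat) (e : Int × Nat) : Prop :=
  ∃ i : Nat, e.1 = (i : Int) ∧ i < tree.length ∧ pvCh tree r tree.length i = some e.2

lemma pvT_pyGet (tree : List Int) (i : Nat) (h : i < tree.length) :
    (PySem.List.pyGet? tree (i : Int)).getD 0 = pvT tree i := by
  rw [PySem.List.pyGet?_natCast]
  simp [pvT, List.getD, List.getElem?_eq_getElem h]

lemma pvT_pyGet' (tree : List Int) (i : Nat) :
    (PySem.List.pyGet? tree (i : Int)).getD 0 = pvT tree i := by
  rw [PySem.List.pyGet?_natCast]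
  simp [pvT, List.getD]

lemma pvNormN_lt (n : Nat) (t : Int) (h1 : -(n : Int) ≤ t) (h2 : t < n) : pvNormN n t < n := by
  unfold pvNormN; split <;> omega

lemma pyIdx?_norm (n : Nat) (t : Int) (h1 : -(n : Int) ≤ t) (h2 : t < n) :
    PySem.List.pyIdx? n t = some (pvNormN n t) := by
  unfold PySem.List.pyIdx? pvNormN
  rcases le_or_gt 0 t with h | h
  · rw [if_pos h, if_pos h2, if_pos h]
  · rw [if_neg (by omega), if_pos h1, if_neg (by omega)]

lemma pyGet?_norm {α : Type} (xs : List α) (t : Int) (h1 : -(xs.length : Int) ≤ t)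
    (h2 : t < xs.length) : PySem.List.pyGet? xs t = xs[pvNormN xs.length t]? := by
  unfold PySem.List.pyGet?
  rw [pyIdx?_norm _ _ h1 h2]; rfl

lemma pySetD_norm {α : Type} (xs : List α) (t : Int) (v : α) (h1 : -(xs.length : Int) ≤ t)
    (h2 : t < xs.length) : PySem.List.pySetD xs t v = xs.set (pvNormN xs.length t) v := by
  unfold PySem.List.pySetD PySem.List.pySet?
  rw [pyIdx?_norm _ _ h1 h2]; rfl

lemma pvPre_bound (tree : List Int) (hPre : Pre_get_max_deep tree) (i : Nat)
    (h : i < tree.length) : -(tree.length : Int) ≤ pvT tree i ∧ pvT tree i < tree.length := by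
  have hm : pvT tree i ∈ tree := by
    simp [pvT, List.getD, List.getElem?_eq_getElem h]
  exact hPre.2 _ hm

lemma pvPar?_lt (tree : List Int) (hPre : Pre_get_max_deep tree) (i : Nat)
    (h : i < tree.length) {p : Nat} (hp : pvPar? tree i = some p) : p < tree.length := by
  unfold pvPar? at hp
  by_cases ht : pvT tree i = -1
  · simp [ht] at hp
  · simp [ht] at hp
    obtain ⟨b1, b2⟩ := pvPre_bound tree hPre i h
    subst hp; exact pvNormN_lt _ _ b1 b2

-- root fold: a result is a valid index carrying -1
lemma pvRootAux (tree : List Int) :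
    ∀ (k : Nat) (init : Option Nat) (r : Nat),
      (List.range k).foldl
        (fun (r : Option Nat) (i : Nat) =>
          if (PySem.List.pyGet? tree (i : Int)).getD 0 == -1 then some i else r) init
        = some r →
      (init = some r ∨ (r < k ∧ (PySem.List.pyGet? tree (r : Int)).getD 0 = -1)) := by
  intro k
  induction k with
  | zero => intro init r h; simp at h; exact Or.inl h
  | succ k ih =>
    intro init r h
    rw [List.range_succ, List.foldl_append] at h
    simp only [List.foldl_cons, List.foldl_nil] at h
    by_cases hc : ((PySem.List.pyGet? tree (k : Int)).getD 0 == -1) = true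
    · rw [if_pos hc] at h
      have hr : r = k := (Option.some_inj.1 h).symm
      subst hr
      exact Or.inr ⟨by omega, by simpa using hc⟩
    · rw [if_neg hc] at h
      rcases ih _ _ h with h' | h'
      · exact Or.inl h'
      · exact Or.inr ⟨by omega, h'.2⟩

-- root fold: if some index carries -1, the fold returns some
lemma pvRootAux2 (tree : List Int) :
    ∀ (k : Nat) (init : Option Nat),
      (∃ i, i < k ∧ (PySem.List.pyGet? tree (i : Int)).getD 0 = -1) →
      ∃ r, (List.range k).foldl
        (fun (r : Option Nat) (i : Nat) =>
          if (PySem.List.pyGet? tree (i : Int)).getD 0 == -1 then some i else r) init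
        = some r := by
  intro k
  induction k with
  | zero => intro init ⟨i, hi, _⟩; omega
  | succ k ih =>
    intro init ⟨i, hi, hv⟩
    rw [List.range_succ, List.foldl_append]
    simp only [List.foldl_cons, List.foldl_nil]
    by_cases hc : ((PySem.List.pyGet? tree (k : Int)).getD 0 == -1) = true
    · rw [if_pos hc]
      exact ⟨k, rfl⟩
    · rw [if_neg hc]
      apply ih
      have hik : i ≠ k := by
        intro h; subst h
        exact hc (by rw [hv]; simp)
      exact ⟨i, by omega, hv⟩

lemma pvRootFold_spec (tree : List Int) (hPre : Pre_get_max_deep tree) :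
    ∃ r, (List.range tree.length).foldl
        (fun (r : Option Nat) (i : Nat) =>
          if (PySem.List.pyGet? tree (i : Int)).getD 0 == -1 then some i else r) none
        = some r ∧ r < tree.length ∧ pvT tree r = -1 := by
  obtain ⟨i, hi, hv⟩ := List.mem_iff_getElem.1 hPre.1
  have hv' : (PySem.List.pyGet? tree (i : Int)).getD 0 = -1 := by
    rw [pvT_pyGet tree i hi]; simp [pvT, List.getD, List.getElem?_eq_getElem hi, hv]
  obtain ⟨r, hr⟩ := pvRootAux2 tree tree.length none ⟨i, hi, hv'⟩
  rcases pvRootAux tree tree.length none r hr with h | ⟨h1, h2⟩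
  · cases h
  · exact ⟨r, hr, h1, by rw [← pvT_pyGet tree r h1]; exact h2⟩

lemma pvInitHelp_eq (n : Nat) : pvInitHelp n = List.replicate n [] := by
  induction n with
  | zero => rfl
  | succ n ih =>
    rw [pvInitHelp, List.range_succ, List.foldl_append]
    simp only [List.foldl_cons, List.foldl_nil]
    rw [← pvInitHelp, ih, ← List.replicate_succ']

lemma pvBuildStep_neg1 (tree : List Int) (st : List (List Int) × Option Nat) (i : Nat)
    (h : (PySem.List.pyGet? tree (i : Int)).getD 0 = -1) :
    pvBuildStep tree st i = (st.1, some i) := by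
  unfold pvBuildStep
  rw [if_pos (by rw [h]; simp)]

lemma pvBuildStep_app (tree : List Int) (st : List (List Int) × Option Nat) (i : Nat)
    (l : List Int) (hne : (PySem.List.pyGet? tree (i : Int)).getD 0 ≠ -1)
    (hl : PySem.List.pyGet? st.1 ((PySem.List.pyGet? tree (i : Int)).getD 0) = some l) :
    pvBuildStep tree st i
      = (PySem.List.pySetD st.1 ((PySem.List.pyGet? tree (i : Int)).getD 0)
          (l ++ [(i : Int)]), st.2) := by
  unfold pvBuildStep
  rw [if_neg (by simpa using hne), hl]

lemma pvHelpL_succ_none (tree : List Int) (k j : Nat) (h : pvPar? tree k = none) :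
    pvHelpL tree (k+1) j = pvHelpL tree k j := by
  unfold pvHelpL
  rw [List.range_succ, List.filter_append]
  simp [h]

lemma pvHelpL_succ_some (tree : List Int) (k j q : Nat) (h : pvPar? tree k = some q) :
    pvHelpL tree (k+1) j
      = if q = j then pvHelpL tree k j ++ [(k : Int)] else pvHelpL tree k j := by
  unfold pvHelpL
  rw [List.range_succ, List.filter_append]
  by_cases hqj : q = j
  · simp [h, hqj]
  · simp [h, hqj]

-- A's construction loop: state after processing 0..k-1
lemma pvBuild_spec (tree : List Int) (hPre : Pre_get_max_deep tree) :
    ∀ k, k ≤ tree.length →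
      (((List.range k).foldl (pvBuildStep tree) (pvInitHelp tree.length, none)).1.length
          = tree.length) ∧
      (∀ j, j < tree.length →
        (((List.range k).foldl (pvBuildStep tree) (pvInitHelp tree.length, none)).1)[j]?
          = some (pvHelpL tree k j)) ∧
      ((List.range k).foldl (pvBuildStep tree) (pvInitHelp tree.length, none)).2
        = (List.range k).foldl
            (fun (r : Option Nat) (i : Nat) =>
              if (PySem.List.pyGet? tree (i : Int)).getD 0 == -1 then some i else r)
            none := by
  intro k
  induction k with
  | zero =>
    intro _
    refine ⟨by simp [pvInitHelp_eq], ?_, by simp⟩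
    intro j hj
    simp [pvInitHelp_eq, pvHelpL, hj]
  | succ k ih =>
    intro hk
    have hklt : k < tree.length := by omega
    obtain ⟨ih1, ih2, ih3⟩ := ih (by omega)
    rw [List.range_succ, List.foldl_append, List.foldl_append]
    simp only [List.foldl_cons, List.foldl_nil]
    by_cases hT : pvT tree k = -1
    · have hT' : (PySem.List.pyGet? tree (k : Int)).getD 0 = -1 := by
        rw [pvT_pyGet tree k hklt]; exact hT
      rw [pvBuildStep_neg1 tree _ k hT', if_pos (by rw [hT']; simp)]
      have hpar : pvPar? tree k = none := by unfold pvPar?; rw [if_pos hT]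
      exact ⟨ih1, fun j hj => by rw [pvHelpL_succ_none tree k j hpar]; exact ih2 j hj, rfl⟩
    · have hT' : (PySem.List.pyGet? tree (k : Int)).getD 0 = pvT tree k := pvT_pyGet tree k hklt
      obtain ⟨b1, b2⟩ := pvPre_bound tree hPre k hklt
      have hq : pvNormN tree.length (pvT tree k) < tree.length := pvNormN_lt _ _ b1 b2
      have hpar : pvPar? tree k = some (pvNormN tree.length (pvT tree k)) := by
        unfold pvPar?; rw [if_neg hT]
      have hGet : PySem.List.pyGet?
          ((List.range k).foldl (pvBuildStep tree) (pvInitHelp tree.length, none)).1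
          ((PySem.List.pyGet? tree (k : Int)).getD 0)
          = some (pvHelpL tree k (pvNormN tree.length (pvT tree k))) := by
        rw [hT', pyGet?_norm _ _ (by rw [ih1]; exact b1) (by rw [ih1]; exact b2), ih1]
        exact ih2 _ hq
      rw [pvBuildStep_app tree _ k _ (by rw [hT']; exact hT) hGet,
        if_neg (by rw [hT']; simpa using hT)]
      have hSet : PySem.List.pySetD
          ((List.range k).foldl (pvBuildStep tree) (pvInitHelp tree.length, none)).1
          ((PySem.List.pyGet? tree (k : Int)).getD 0)
          (pvHelpL tree k (pvNormN tree.length (pvT tree k)) ++ [(k : Int)])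
          = ((List.range k).foldl (pvBuildStep tree) (pvInitHelp tree.length, none)).1.set
              (pvNormN tree.length (pvT tree k))
              (pvHelpL tree k (pvNormN tree.length (pvT tree k)) ++ [(k : Int)]) := by
        rw [hT', pySetD_norm _ _ _ (by rw [ih1]; exact b1) (by rw [ih1]; exact b2), ih1]
      rw [hSet]
      refine ⟨by rw [List.length_set]; exact ih1, ?_, ih3⟩
      intro j hj
      rw [List.getElem?_set, pvHelpL_succ_some tree k j _ hpar]
      by_cases hqj : pvNormN tree.length (pvT tree k) = j
      · rw [if_pos hqj, if_pos (by rw [ih1]; omega), if_pos hqj, hqj]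
      · rw [if_neg hqj, if_neg hqj]
        exact ih2 j hj

lemma pvHelpL_mem (tree : List Int) (k j : Nat) (z : Int) :
    z ∈ pvHelpL tree k j ↔ ∃ i, i < k ∧ pvPar? tree i = some j ∧ z = (i : Int) := by
  unfold pvHelpL
  simp only [List.mem_map, List.mem_filter, List.mem_range, beq_iff_eq, Int.ofNat_eq_natCast]
  constructor
  · rintro ⟨i, ⟨hi, hp⟩, hz⟩
    exact ⟨i, hi, hp, hz.symm⟩
  · rintro ⟨i, hi, hp, hz⟩
    exact ⟨i, ⟨hi, hp⟩, hz.symm⟩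

-- basic facts about pvCh
lemma pvCh_pos (tree : List Int) (r : Nat) {f i d : Nat} (h : pvCh tree r f i = some d) :
    1 ≤ d := by
  cases f with
  | zero =>
    unfold pvCh at h; split at h
    · simp at h; omega
    · cases h
  | succ f =>
    unfold pvCh at h; split at h
    · simp at h; omega
    · revert h
      rcases pvPar? tree i with _ | p
      · intro h; simp at h
      · intro h; simp at h
        obtain ⟨d0, _, hd⟩ := h
        omega

lemma pvCh_root (tree : List Int) (r : Nat) (f : Nat) : pvCh tree r f r = some 1 := by
  cases f <;> simp [pvCh]

lemma pvCh_one (tree : List Int) (r : Nat) {f i : Nat} (h : pvCh tree r f i = some 1) :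
    i = r := by
  by_contra hne
  cases f with
  | zero => simp [pvCh, hne] at h
  | succ f =>
    unfold pvCh at h; rw [if_neg hne] at h
    revert h
    rcases pvPar? tree i with _ | p
    · intro h; simp at h
    · intro h
      rw [Option.bind_some, Option.map_eq_some_iff] at h
      obtain ⟨d0, hc, hd⟩ := h
      have := pvCh_pos tree r hc; omega

lemma pvCh_mono (tree : List Int) (r : Nat) :
    ∀ {f i d : Nat}, pvCh tree r f i = some d → pvCh tree r (f+1) i = some d := by
  intro f
  induction f with
  | zero =>
    intro i d h
    unfold pvCh at h ⊢; split at h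
    · simpa [*] using h
    · cases h
  | succ f ih =>
    intro i d h
    unfold pvCh at h ⊢
    split at h
    · simpa [*] using h
    · rename_i hne
      rw [if_neg hne]
      revert h
      rcases pvPar? tree i with _ | p
      · intro h; simp at h
      · intro h; simp at h ⊢
        obtain ⟨d0, hc, hd⟩ := h
        exact ⟨d0, ih hc, hd⟩

lemma pvCh_le_fuel (tree : List Int) (r : Nat) {f f' i d : Nat} (hle : f ≤ f')
    (h : pvCh tree r f i = some d) : pvCh tree r f' i = some d := by
  induction f', hle using Nat.le_induction with
  | base => exact h
  | succ f' _ ih => exact pvCh_mono tree r ih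

lemma pvCh_det (tree : List Int) (r : Nat) {f f' i d d' : Nat}
    (h : pvCh tree r f i = some d) (h' : pvCh tree r f' i = some d') : d = d' := by
  have h1 := pvCh_le_fuel tree r (Nat.le_max_left f f') h
  have h2 := pvCh_le_fuel tree r (Nat.le_max_right f f') h'
  rw [h1] at h2; exact Option.some_inj.1 h2

lemma pvCh_inv (tree : List Int) (r : Nat) {f i d : Nat} (hne : i ≠ r)
    (h : pvCh tree r (f+1) i = some d) :
    ∃ p d0, pvPar? tree i = some p ∧ pvCh tree r f p = some d0 ∧ d = d0 + 1 := by
  unfold pvCh at h; rw [if_neg hne] at h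
  revert h
  rcases hp : pvPar? tree i with _ | p
  · intro h; simp at h
  · intro h; simp at h
    obtain ⟨d0, hc, hd⟩ := h
    exact ⟨p, d0, rfl, hc, hd.symm⟩

lemma pvCh_minfuel (tree : List Int) (r : Nat) :
    ∀ {f i d : Nat}, pvCh tree r f i = some d → pvCh tree r (d-1) i = some d := by
  intro f
  induction f with
  | zero =>
    intro i d h
    unfold pvCh at h; split at h
    · rename_i he
      have hd : d = 1 := by simpa using h.symm
      subst hd
      simpa [he] using pvCh_root tree r 0
    · cases h
  | succ f ih =>
    intro i d h
    by_cases he : i = r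
    · have h1 : pvCh tree r (f+1) i = some 1 := by rw [he]; exact pvCh_root tree r (f+1)
      have hd : d = 1 := pvCh_det tree r h h1
      subst hd
      simpa [he] using pvCh_root tree r 0
    · obtain ⟨p, d0, hp, hc, hd⟩ := pvCh_inv tree r he h
      have h1 := pvCh_pos tree r hc
      have hstep : pvCh tree r ((d0 - 1) + 1) i = some (d0 + 1) := by
        unfold pvCh
        rw [if_neg he, hp]
        simp [ih hc]
      subst hd
      simpa [Nat.sub_add_cancel h1, Nat.add_sub_cancel] using hstep

-- every realized depth is at most the number of nodes (the chain of ancestors is injective)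
lemma pvCh_chain (tree : List Int) (hPre : Pre_get_max_deep tree) (r : Nat) :
    ∀ (f i d : Nat), i < tree.length → pvCh tree r f i = some d →
      ∃ L : List Nat, L.length = d ∧ (∀ x ∈ L, x < tree.length) ∧
        ∀ (k : Nat) (hk : k < L.length), ∃ g, pvCh tree r g L[k] = some (d - k) := by
  intro f
  induction f with
  | zero =>
    intro i d hi h
    unfold pvCh at h; split at h
    · rename_i he
      have hd : d = 1 := by simpa using h.symm
      subst hd
      refine ⟨[i], rfl, by simpa using hi, ?_⟩
      intro k hk
      simp only [List.length_singleton, Nat.lt_one_iff] at hk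
      subst hk
      exact ⟨0, by simpa [he] using pvCh_root tree r 0⟩
    · cases h
  | succ f ih =>
    intro i d hi h
    by_cases he : i = r
    · have h1 : pvCh tree r (f+1) i = some 1 := by rw [he]; exact pvCh_root tree r (f+1)
      have hd : d = 1 := pvCh_det tree r h h1
      subst hd
      refine ⟨[i], rfl, by simpa using hi, ?_⟩
      intro k hk
      simp only [List.length_singleton, Nat.lt_one_iff] at hk
      subst hk
      exact ⟨f+1, by simpa using h⟩
    · obtain ⟨p, d0, hp, hc, hd⟩ := pvCh_inv tree r he h
      obtain ⟨L0, hl, hb, hidx⟩ := ih p d0 (pvPar?_lt tree hPre i hi hp) hc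
      refine ⟨i :: L0, by simp [hl, hd], ?_, ?_⟩
      · intro x hx
        rcases List.mem_cons.1 hx with rfl | hx
        · exact hi
        · exact hb _ hx
      · intro k hk
        cases k with
        | zero => exact ⟨f+1, by simpa using h⟩
        | succ k =>
          simp only [List.length_cons] at hk
          obtain ⟨g, hg⟩ := hidx k (by omega)
          exact ⟨g, by simpa [hd] using hg⟩

lemma pvCh_le_n (tree : List Int) (hPre : Pre_get_max_deep tree) (r : Nat)
    {f i d : Nat} (hi : i < tree.length) (h : pvCh tree r f i = some d) :
    d ≤ tree.length := by
  obtain ⟨L, hl, hb, hidx⟩ := pvCh_chain tree hPre r f i d hi h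
  have hnd : L.Nodup := by
    rw [List.nodup_iff_injective_get]
    intro a b hab
    obtain ⟨g1, h1⟩ := hidx a a.2
    obtain ⟨g2, h2⟩ := hidx b b.2
    rw [List.get_eq_getElem] at hab
    rw [hab] at h1
    have hdd := pvCh_det tree r h1 h2
    have ha := a.2; have hb' := b.2
    have hp1 := pvCh_pos tree r h1
    exact Fin.ext (by omega)
  have hsub : L.toFinset ⊆ Finset.range tree.length := by
    intro x hx
    simp only [List.mem_toFinset] at hx
    simpa using hb x hx
  have hcard := Finset.card_le_card hsub
  rw [List.toFinset_card_of_nodup hnd] at hcard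
  simpa [hl] using hcard

-- a running max over a projection is attained (or is the initial value)
lemma pvFoldMaxAttain (l : List Nat) (f : Nat → Nat) :
    ∀ init, l.foldl (fun b x => max b (f x)) init = init ∨
      ∃ x ∈ l, l.foldl (fun b x => max b (f x)) init = f x := by
  induction l with
  | nil => intro init; exact Or.inl rfl
  | cons a t ih =>
    intro init
    simp only [List.foldl_cons]
    rcases ih (max init (f a)) with h | ⟨x, hx, h⟩
    · rcases Nat.le_total init (f a) with hle | hle
      · exact Or.inr ⟨a, List.mem_cons_self, by rw [h]; omega⟩
      · exact Or.inl (by rw [h]; omega)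
    · exact Or.inr ⟨x, List.mem_cons_of_mem _ hx, h⟩

lemma pvM_ge_one (tree : List Int) (r : Nat) : 1 ≤ pvM tree r :=
  (PySem.List.le_foldl_max_nat _ _ _).1

lemma pvM_le (tree : List Int) (r : Nat) {i d : Nat} (hi : i < tree.length)
    (h : pvCh tree r tree.length i = some d) : d ≤ pvM tree r := by
  have := (PySem.List.le_foldl_max_nat (List.range tree.length) (pvBVal tree r) 1).2
    i (List.mem_range.2 hi)
  simpa [pvBVal, h] using this

lemma pvM_attained (tree : List Int) (hPre : Pre_get_max_deep tree) {r : Nat}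
    (hr : r < tree.length) :
    ∃ i, i < tree.length ∧ pvCh tree r tree.length i = some (pvM tree r) := by
  rcases pvFoldMaxAttain (List.range tree.length) (pvBVal tree r) 1 with h | ⟨i, hi, h⟩
  · refine ⟨r, hr, ?_⟩
    have hm : pvM tree r = 1 := h
    rw [hm]; exact pvCh_root tree r tree.length
  · have hm : pvM tree r = pvBVal tree r i := h
    rcases hc : pvCh tree r tree.length i with _ | d
    · exfalso
      have h1 := pvM_ge_one tree r
      rw [hm] at h1
      simp [pvBVal, hc] at h1
    · refine ⟨i, List.mem_range.1 hi, ?_⟩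
      rw [hm]
      simp [pvBVal, hc]

-- the set of realized depths is downward closed (above 1)
lemma pvAch_pred (tree : List Int) (hPre : Pre_get_max_deep tree) (r : Nat) {d : Nat}
    (hd : 2 ≤ d) (h : ∃ i, i < tree.length ∧ pvCh tree r tree.length i = some d) :
    ∃ i, i < tree.length ∧ pvCh tree r tree.length i = some (d - 1) := by
  obtain ⟨i, hi, hc⟩ := h
  have hn : 1 ≤ tree.length := by omega
  have he : i ≠ r := by
    intro hh
    have h1 : pvCh tree r tree.length i = some 1 := by
      rw [hh]; exact pvCh_root tree r tree.length
    have := pvCh_det tree r hc h1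
    omega
  obtain ⟨f, hf⟩ : ∃ f, tree.length = f + 1 := ⟨tree.length - 1, by omega⟩
  rw [hf] at hc
  obtain ⟨p, d0, hp, hc0, hd0⟩ := pvCh_inv tree r he hc
  have hplt := pvPar?_lt tree hPre i hi hp
  refine ⟨p, hplt, ?_⟩
  have hmono : pvCh tree r (f+1) p = some d0 := pvCh_mono tree r hc0
  rw [hf]
  simpa [show d - 1 = d0 by omega] using hmono

lemma pvAch_down (tree : List Int) (hPre : Pre_get_max_deep tree) (r : Nat) {d : Nat}
    (hd : 1 ≤ d) :
    ∀ k, (∃ i, i < tree.length ∧ pvCh tree r tree.length i = some (d + k)) →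
      ∃ i, i < tree.length ∧ pvCh tree r tree.length i = some d := by
  intro k
  induction k with
  | zero => intro h; exact h
  | succ k ih =>
    intro h
    apply ih
    have := pvAch_pred tree hPre r (d := d + (k+1)) (by omega) h
    simpa [show d + (k+1) - 1 = d + k by omega] using this

lemma pvM_le_n (tree : List Int) (hPre : Pre_get_max_deep tree) {r : Nat}
    (hr : r < tree.length) : pvM tree r ≤ tree.length := by
  obtain ⟨i, hi, h⟩ := pvM_attained tree hPre hr
  exact pvCh_le_n tree hPre r hi h

-- frontier step: the next BFS frontier holds exactly the nodes one level deeper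
lemma pvLevel_step (tree : List Int) (hPre : Pre_get_max_deep tree) {r : Nat}
    (hr : r < tree.length) (hrT : pvT tree r = -1)
    (H : List (List Int)) (hHlen : H.length = tree.length)
    (hH : ∀ j, j < tree.length → H[j]? = some (pvHelpL tree tree.length j))
    (k : Nat) (F : List Int)
    (hF : ∀ z : Int, z ∈ F ↔ ∃ i, i < tree.length ∧ z = (i : Int) ∧
            pvCh tree r tree.length i = some (k+2)) :
    ∀ z : Int, z ∈ pvLevelA H F ↔ ∃ i, i < tree.length ∧ z = (i : Int) ∧
      pvCh tree r tree.length i = some (k+3) := by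
  intro z
  obtain ⟨n', hn'⟩ : ∃ n', tree.length = n' + 1 := ⟨tree.length - 1, by omega⟩
  have hParR : pvPar? tree r = none := by unfold pvPar?; rw [if_pos hrT]
  rw [pvLevelA, PySem.List.foldl_append_eq_flatMap]
  simp only [List.nil_append, List.mem_flatMap, List.mem_reverse]
  constructor
  · rintro ⟨x, hxF, hz⟩
    obtain ⟨i, hi, hxi, hci⟩ := (hF x).1 hxF
    rw [hxi, PySem.List.pyGet?_natCast, hH i hi, Option.getD_some] at hz
    obtain ⟨i', hi', hp', hz'⟩ := (pvHelpL_mem tree tree.length i z).1 hz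
    refine ⟨i', hi', hz', ?_⟩
    have hne : i' ≠ r := by
      intro hh; rw [hh, hParR] at hp'; cases hp'
    have hle : k + 2 ≤ tree.length := pvCh_le_n tree hPre r hi hci
    have hmin : pvCh tree r (k+1) i = some (k+2) := by
      have := pvCh_minfuel tree r hci
      simpa using this
    have hfit : pvCh tree r n' i = some (k+2) :=
      pvCh_le_fuel tree r (by omega) hmin
    have hres : pvCh tree r (n'+1) i' = some (k+3) := by
      unfold pvCh
      rw [if_neg hne, hp']
      simp [hfit]
    rw [← hn'] at hres
    exact hres
  · rintro ⟨i', hi', hz, hci⟩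
    have hne : i' ≠ r := by
      intro hh
      have h1 : pvCh tree r tree.length i' = some 1 := by
        rw [hh]; exact pvCh_root tree r tree.length
      have := pvCh_det tree r hci h1; omega
    rw [hn'] at hci
    obtain ⟨p, d0, hp, hc0, hd0⟩ := pvCh_inv tree r hne hci
    have hd0' : d0 = k + 2 := by omega
    have hplt : p < tree.length := pvPar?_lt tree hPre i' hi' hp
    have hcp : pvCh tree r tree.length p = some (k+2) := by
      rw [hn']
      exact pvCh_mono tree r (hd0' ▸ hc0)
    refine ⟨(p : Int), (hF _).2 ⟨p, hplt, rfl, hcp⟩, ?_⟩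
    rw [PySem.List.pyGet?_natCast, hH p hplt, Option.getD_some]
    exact (pvHelpL_mem tree tree.length p z).2 ⟨i', hi', hp, hz⟩

lemma pvBfs_run (tree : List Int) (hPre : Pre_get_max_deep tree) {r : Nat}
    (hr : r < tree.length) (hrT : pvT tree r = -1)
    (H : List (List Int)) (hHlen : H.length = tree.length)
    (hH : ∀ j, j < tree.length → H[j]? = some (pvHelpL tree tree.length j)) :
    ∀ (fuel k : Nat) (F : List Int),
      (∀ z : Int, z ∈ F ↔ ∃ i, i < tree.length ∧ z = (i : Int) ∧
        pvCh tree r tree.length i = some (k+2)) →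
      k + 1 ≤ pvM tree r → pvM tree r ≤ k + fuel →
      pvBfsA H fuel F (k+1) = pvM tree r := by
  intro fuel
  induction fuel with
  | zero => intro k F _ h1 h2; omega
  | succ fuel ih =>
    intro k F hF h1 h2
    by_cases hemp : F = []
    · subst hemp
      have hm : pvM tree r = k + 1 := by
        by_contra hne
        have h3 : k + 2 ≤ pvM tree r := by omega
        obtain ⟨i, hi, hc⟩ := pvM_attained tree hPre hr
        obtain ⟨i', hi', hc'⟩ := pvAch_down tree hPre r (d := k + 2) (by omega)
          (pvM tree r - (k+2)) (by
            have hx : k + 2 + (pvM tree r - (k+2)) = pvM tree r := by omega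
            rw [hx]; exact ⟨i, hi, hc⟩)
        have : ((i' : Int)) ∈ ([] : List Int) := (hF _).2 ⟨i', hi', rfl, hc'⟩
        cases this
      simp [pvBfsA, hm]
    · have hne : F.isEmpty = false := by
        rw [← Bool.not_eq_true, List.isEmpty_iff]; exact hemp
      obtain ⟨z, hz⟩ := List.exists_mem_of_ne_nil F hemp
      obtain ⟨i, hi, _, hc⟩ := (hF z).1 hz
      have h3 : k + 2 ≤ pvM tree r := pvM_le tree r hi hc
      unfold pvBfsA
      rw [hne]
      simp only [Bool.false_eq_true, if_false]
      have := ih (k+1) (pvLevelA H F)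
        (pvLevel_step tree hPre hr hrT H hHlen hH k F hF)
        (by omega) (by omega)
      simpa using this

-- ========== B-side lemmas ==========

-- the enumerate loop seen as a loop over Nat indices
lemma pvEnum_eq (tree : List Int) :
    PySem.List.enumerate tree 0
      = (List.range tree.length).map (fun k : Nat => ((k : Int), pvT tree k)) := by
  apply List.ext_getElem
  · simp [PySem.List.length_enumerate]
  · intro k h1 h2
    have hk : k < tree.length := by simpa using h2
    rw [PySem.List.getElem_enumerate]
    simp [pvT, List.getD, List.getElem?_eq_getElem hk]

lemma pvStepBA (tree : List Int) (k : Nat) (st : List (List Int) × Option Nat) :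
    pvBStep (st.1, st.2.map (fun i : Nat => (i : Int))) ((k : Int), pvT tree k)
      = ((pvBuildStep tree st k).1,
         (pvBuildStep tree st k).2.map (fun i : Nat => (i : Int))) := by
  unfold pvBStep pvBuildStep
  simp only [pvT_pyGet']
  by_cases hc : (pvT tree k == -1) = true
  · simp [hc]
  · simp only [hc, Bool.false_eq_true, if_false]
    cases hg : PySem.List.pyGet? st.1 (pvT tree k) <;> simp

lemma pvFoldBA (tree : List Int) :
    ∀ (l : List Nat) (st : List (List Int) × Option Nat),
      l.foldl (fun s (k : Nat) => pvBStep s ((k : Int), pvT tree k))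
          (st.1, st.2.map (fun i : Nat => (i : Int)))
        = ((l.foldl (pvBuildStep tree) st).1,
           (l.foldl (pvBuildStep tree) st).2.map (fun i : Nat => (i : Int))) := by
  intro l
  induction l with
  | nil => intro st; rfl
  | cons a t ih =>
    intro st
    simp only [List.foldl_cons]
    rw [pvStepBA]
    exact ih (pvBuildStep tree st a)

lemma pvMapConst (tree : List Int) :
    tree.map (fun _ => ([] : List Int)) = List.replicate tree.length [] := by
  induction tree with
  | nil => rfl
  | cons a t ih => simp [ih, List.replicate_succ]

lemma pvBuildB_eq (tree : List Int) :
    (pvBuildB tree).1 = (pvBuildA tree).1 ∧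
    (pvBuildB tree).2 = (pvBuildA tree).2.map (fun i : Nat => (i : Int)) := by
  unfold pvBuildB pvBuildA
  rw [pvEnum_eq, List.foldl_map, pvMapConst, ← pvInitHelp_eq]
  have h := pvFoldBA tree (List.range tree.length) (pvInitHelp tree.length, none)
  simp only [Option.map_none] at h
  rw [h]
  exact ⟨rfl, rfl⟩

-- climbing a chain: the element m-1 steps above i, seen from a chain that ends at ρ
lemma pvClimb (tree : List Int) (ρ : Nat) (hρ : pvPar? tree ρ = none) :
    ∀ (f b i m : Nat), pvCh tree b f i = some m →
      ∀ (g d : Nat), pvCh tree ρ g i = some d →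
        m ≤ d ∧ ∃ g', pvCh tree ρ g' b = some (d - m + 1) := by
  intro f
  induction f with
  | zero =>
    intro b i m h g d h2
    unfold pvCh at h
    split at h
    · rename_i he
      have hm : m = 1 := by simpa using h.symm
      have hp := pvCh_pos tree ρ h2
      subst he
      exact ⟨by omega, ⟨g, by rw [hm, show d - 1 + 1 = d by omega]; exact h2⟩⟩
    · cases h
  | succ f ih =>
    intro b i m h g d h2
    by_cases he : i = b
    · subst he
      have hm : m = 1 := pvCh_det tree i h (pvCh_root tree i (f+1))
      have hp := pvCh_pos tree ρ h2
      exact ⟨by omega, ⟨g, by rw [hm, show d - 1 + 1 = d by omega]; exact h2⟩⟩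
    · obtain ⟨q, m0, hq, hc, hm⟩ := pvCh_inv tree b he h
      have hiρ : i ≠ ρ := by
        intro hh; subst hh; rw [hρ] at hq; cases hq
      cases g with
      | zero =>
        unfold pvCh at h2; rw [if_neg hiρ] at h2; cases h2
      | succ g =>
        obtain ⟨q', d0, hq', hc', hd⟩ := pvCh_inv tree ρ hiρ h2
        have hqq : q' = q := by rw [hq] at hq'; exact Option.some_inj.1 hq'.symm
        rw [hqq] at hc'
        obtain ⟨hle, g', hg'⟩ := ih b q m0 hc g d0 hc'
        refine ⟨by omega, ⟨g', ?_⟩⟩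
        have hx : d0 - m0 + 1 = d - m + 1 := by omega
        rw [← hx]; exact hg'

-- composing chains: below b at relative depth k, b below ρ at depth e ⇒ below ρ at e+k-1
lemma pvCompose (tree : List Int) (ρ : Nat) (hρ : pvPar? tree ρ = none) :
    ∀ (f b j k : Nat), pvCh tree b f j = some k →
      ∀ (g e : Nat), pvCh tree ρ g b = some e →
        ∃ g', pvCh tree ρ g' j = some (e + k - 1) := by
  intro f
  induction f with
  | zero =>
    intro b j k h g e h2
    unfold pvCh at h
    split at h
    · rename_i he
      have hk : k = 1 := by simpa using h.symm
      subst he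
      exact ⟨g, by rw [hk, show e + 1 - 1 = e by omega]; exact h2⟩
    · cases h
  | succ f ih =>
    intro b j k h g e h2
    by_cases he : j = b
    · subst he
      have hk : k = 1 := pvCh_det tree j h (pvCh_root tree j (f+1))
      exact ⟨g, by rw [hk, show e + 1 - 1 = e by omega]; exact h2⟩
    · obtain ⟨q, k0, hq, hc, hk⟩ := pvCh_inv tree b he h
      have hjρ : j ≠ ρ := by
        intro hh; subst hh; rw [hρ] at hq; cases hq
      obtain ⟨g', hg'⟩ := ih b q k0 hc g e h2
      refine ⟨g' + 1, ?_⟩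
      unfold pvCh
      rw [if_neg hjρ, hq]
      simp only [Option.bind_some, hg', Option.map_some]
      have hk0 := pvCh_pos tree ρ hg'
      have he0 := pvCh_pos tree ρ h2
      congr 1
      omega

-- the chain element at a given height above j is unique
lemma pvSamePos (tree : List Int) :
    ∀ (f : Nat) {f' c c' j k : Nat}, pvCh tree c f j = some k →
      pvCh tree c' f' j = some k → c = c' := by
  intro f
  induction f with
  | zero =>
    intro f' c c' j k h h2
    unfold pvCh at h
    split at h
    · rename_i he
      have hk : k = 1 := by simpa using h.symm
      subst hk
      have := pvCh_one tree c' h2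
      omega
    · cases h
  | succ f ih =>
    intro f' c c' j k h h2
    by_cases he : j = c
    · subst he
      have hk : k = 1 := pvCh_det tree j h (pvCh_root tree j (f+1))
      subst hk
      have := pvCh_one tree c' h2
      omega
    · obtain ⟨q, k0, hq, hc, hk⟩ := pvCh_inv tree c he h
      have hk2 : k ≠ 1 := by
        have := pvCh_pos tree c hc; omega
      have he' : j ≠ c' := by
        intro hh; subst hh
        exact hk2 (pvCh_det tree j h2 (pvCh_root tree j f'))
      cases f' with
      | zero =>
        unfold pvCh at h2; rw [if_neg he'] at h2; cases h2
      | succ f'' =>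
        obtain ⟨q', k0', hq', hc', hk'⟩ := pvCh_inv tree c' he' h2
        have hqq : q' = q := by rw [hq] at hq'; exact Option.some_inj.1 hq'.symm
        rw [hqq] at hc'
        have hkk : k0' = k0 := by omega
        rw [hkk] at hc'
        exact ih hc hc'

-- splitting a chain of height ≥ 2 above i at the child of i it passes through
lemma pvSplit (tree : List Int) (hPre : Pre_get_max_deep tree) (i : Nat) :
    ∀ (f j m : Nat), j < tree.length → pvCh tree i f j = some m → 2 ≤ m →
      ∃ c, c < tree.length ∧ pvPar? tree c = some i ∧
        pvCh tree c tree.length j = some (m - 1) := by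
  intro f
  induction f with
  | zero =>
    intro j m hj h hm
    unfold pvCh at h
    split at h
    · have : m = 1 := by simpa using h.symm
      omega
    · cases h
  | succ f ih =>
    intro j m hj h hm
    by_cases he : j = i
    · subst he
      have : m = 1 := pvCh_det tree j h (pvCh_root tree j (f+1))
      omega
    · obtain ⟨q, m0, hq, hc, hmm⟩ := pvCh_inv tree i he h
      by_cases hm0 : m0 = 1
      · refine ⟨j, hj, ?_, ?_⟩
        · have : q = i := pvCh_one tree i (hm0 ▸ hc)
          rw [← this]; exact hq
        · rw [show m - 1 = 1 by omega]
          exact pvCh_root tree j tree.length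
      · have hm0' : 2 ≤ m0 := by
          have := pvCh_pos tree i hc; omega
        have hqn : q < tree.length := pvPar?_lt tree hPre j hj hq
        obtain ⟨c, hcn, hcp, hcc⟩ := ih q m0 hqn hc hm0'
        have hjc : j ≠ c := by
          intro hh; subst hh
          rw [hq] at hcp
          have : q = i := Option.some_inj.1 hcp
          have hqi : q ≠ i := by
            intro hh2; subst hh2
            exact hm0 (pvCh_det tree q hc (pvCh_root tree q f))
          exact hqi this
        refine ⟨c, hcn, hcp, ?_⟩
        have hstep : pvCh tree c (tree.length + 1) j = some (m - 1) := by
          unfold pvCh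
          rw [if_neg hjc, hq]
          simp only [Option.bind_some, hcc, Option.map_some]
          congr 1
          omega
        have hmn : m ≤ tree.length := pvCh_le_n tree hPre i hj h
        have hmin := pvCh_minfuel tree c hstep
        exact pvCh_le_fuel tree c (by omega) hmin

-- a child of a node at depth d from the root sits at depth d+1
lemma pvChildReach (tree : List Int) (hPre : Pre_get_max_deep tree) {r : Nat}
    (hrT : pvT tree r = -1) {i c d : Nat} (hi : i < tree.length)
    (hc : pvPar? tree c = some i) (hreach : pvCh tree r tree.length i = some d) :
    pvCh tree r tree.length c = some (d + 1) := by
  have hρ : pvPar? tree r = none := by unfold pvPar?; rw [if_pos hrT]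
  have hcr : c ≠ r := by
    intro hh; subst hh; rw [hρ] at hc; cases hc
  have hd := pvCh_pos tree r hreach
  have hdn := pvCh_le_n tree hPre r hi hreach
  have hmin := pvCh_minfuel tree r hreach
  have hstep : pvCh tree r ((d-1)+1) c = some (d + 1) := by
    unfold pvCh
    rw [if_neg hcr, hc]
    simp [hmin]
  exact pvCh_le_fuel tree r (by omega) hstep

-- a reachable node is never a descendant of its own child
lemma pvNotDescSelf (tree : List Int) (hPre : Pre_get_max_deep tree) {r i c d : Nat}
    (hrT : pvT tree r = -1) (hi : i < tree.length)
    (hreach : pvCh tree r tree.length i = some d) (hc : pvPar? tree c = some i) :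
    ∀ f m, pvCh tree c f i = some m → False := by
  intro f m h
  have hρ : pvPar? tree r = none := by unfold pvPar?; rw [if_pos hrT]
  obtain ⟨hle, g', hg'⟩ := pvClimb tree r hρ f c i m h tree.length d hreach
  have hcr := pvChildReach tree hPre hrT hi hc hreach
  have hdet := pvCh_det tree r hg' hcr
  have hm := pvCh_pos tree c h
  omega

-- descendants of a child are descendants of the parent, one level deeper
lemma pvDescStep (tree : List Int) (hPre : Pre_get_max_deep tree) {r i c d : Nat}
    (hrT : pvT tree r = -1) (hi : i < tree.length)
    (hreach : pvCh tree r tree.length i = some d) (hc : pvPar? tree c = some i) :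
    ∀ (f j k : Nat), pvCh tree c f j = some k →
      ∃ g, pvCh tree i g j = some (k + 1) := by
  have hci : c ≠ i := by
    intro hh
    exact pvNotDescSelf tree hPre hrT hi hreach hc 0
      1 (by rw [hh]; exact pvCh_root tree i 0)
  intro f
  induction f with
  | zero =>
    intro j k h
    unfold pvCh at h
    split at h
    · rename_i he
      have hk : k = 1 := by simpa using h.symm
      subst he
      refine ⟨1, ?_⟩
      show pvCh tree i (0+1) j = some (k+1)
      unfold pvCh
      rw [if_neg hci, hc]
      simp [pvCh, hk]
    · cases h
  | succ f ih =>
    intro j k h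
    by_cases he : j = c
    · subst he
      have hk : k = 1 := pvCh_det tree j h (pvCh_root tree j (f+1))
      refine ⟨1, ?_⟩
      show pvCh tree i (0+1) j = some (k+1)
      unfold pvCh
      rw [if_neg hci, hc]
      simp [pvCh, hk]
    · obtain ⟨q, k0, hq, hcq, hk⟩ := pvCh_inv tree c he h
      obtain ⟨g, hg⟩ := ih q k0 hcq
      have hji : j ≠ i := by
        intro hh; subst hh
        exact pvNotDescSelf tree hPre hrT hi hreach hc (f+1) k h
      refine ⟨g + 1, ?_⟩
      unfold pvCh
      rw [if_neg hji, hq]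
      simp only [Option.bind_some, hg, Option.map_some]
      congr 1
      omega

lemma pvDesc_mem (tree : List Int) (i j : Nat) :
    j ∈ pvDesc tree i ↔
      j < tree.length ∧ ∃ k, pvCh tree i tree.length j = some k := by
  unfold pvDesc
  simp [Finset.mem_filter, Finset.mem_range, Option.isSome_iff_exists]

lemma pvCF_mem (tree : List Int) (i c : Nat) :
    c ∈ pvCF tree i ↔ c < tree.length ∧ pvPar? tree c = some i := by
  unfold pvCF
  simp [List.mem_range]

lemma pvDesc_sub (tree : List Int) (hPre : Pre_get_max_deep tree) {r i c d : Nat}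
    (hrT : pvT tree r = -1) (hi : i < tree.length)
    (hreach : pvCh tree r tree.length i = some d) (hc : pvPar? tree c = some i) :
    pvDesc tree c ⊆ pvDesc tree i := by
  intro j hj
  obtain ⟨hjn, k, hk⟩ := (pvDesc_mem tree c j).1 hj
  obtain ⟨g, hg⟩ := pvDescStep tree hPre hrT hi hreach hc tree.length j k hk
  have hkn : k ≤ tree.length := pvCh_le_n tree hPre c hjn hk
  have hmin := pvCh_minfuel tree i hg
  have := pvCh_le_fuel tree i (f := k + 1 - 1) (f' := tree.length) (by omega) hmin
  exact (pvDesc_mem tree i j).2 ⟨hjn, k + 1, this⟩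

lemma pvDesc_disj (tree : List Int) (hPre : Pre_get_max_deep tree) {r i d : Nat}
    (hrT : pvT tree r = -1) (hi : i < tree.length)
    (hreach : pvCh tree r tree.length i = some d) {c c' : Nat}
    (hc : pvPar? tree c = some i) (hc' : pvPar? tree c' = some i) (hne : c ≠ c') :
    ∀ j, j ∈ pvDesc tree c → j ∈ pvDesc tree c' → False := by
  intro j hj hj'
  have hρ : pvPar? tree r = none := by unfold pvPar?; rw [if_pos hrT]
  obtain ⟨hjn, k, hk⟩ := (pvDesc_mem tree c j).1 hj
  obtain ⟨_, k', hk'⟩ := (pvDesc_mem tree c' j).1 hj'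
  have hcr := pvChildReach tree hPre hrT hi hc hreach
  have hcr' := pvChildReach tree hPre hrT hi hc' hreach
  obtain ⟨g, hg⟩ := pvCompose tree r hρ tree.length c j k hk tree.length (d+1) hcr
  obtain ⟨hle, g', hg'⟩ := pvClimb tree r hρ tree.length c' j k' hk' g (d+1+k-1) hg
  have hdet := pvCh_det tree r hg' hcr'
  have hkpos := pvCh_pos tree c hk
  have hkpos' := pvCh_pos tree c' hk'
  have hkk : k = k' := by omega
  subst hkk
  exact hne (pvSamePos tree tree.length hk hk')

-- the size of a subtree strictly dominates the sizes of its children's subtrees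
lemma pvSz_ge (tree : List Int) (hPre : Pre_get_max_deep tree) {r i d : Nat}
    (hrT : pvT tree r = -1) (hi : i < tree.length)
    (hreach : pvCh tree r tree.length i = some d) :
    1 + ∑ c ∈ pvCF tree i, pvSz tree c ≤ pvSz tree i := by
  have hdisj : ∀ c ∈ pvCF tree i, ∀ c' ∈ pvCF tree i, c ≠ c' →
      Disjoint (pvDesc tree c) (pvDesc tree c') := by
    intro c hcm c' hcm' hne
    rw [Finset.disjoint_left]
    intro j hj hj'
    exact pvDesc_disj tree hPre hrT hi hreach
      ((pvCF_mem tree i c).1 hcm).2 ((pvCF_mem tree i c').1 hcm').2 hne j hj hj'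
  have hcard : (Finset.biUnion (pvCF tree i) (pvDesc tree)).card
      = ∑ c ∈ pvCF tree i, (pvDesc tree c).card :=
    Finset.card_biUnion hdisj
  have hnotmem : i ∉ Finset.biUnion (pvCF tree i) (pvDesc tree) := by
    intro hmem
    obtain ⟨c, hcm, hcd⟩ := Finset.mem_biUnion.1 hmem
    obtain ⟨_, m, hm⟩ := (pvDesc_mem tree c i).1 hcd
    exact pvNotDescSelf tree hPre hrT hi hreach
      ((pvCF_mem tree i c).1 hcm).2 tree.length m hm
  have hsub : insert i (Finset.biUnion (pvCF tree i) (pvDesc tree)) ⊆ pvDesc tree i := by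
    rw [Finset.insert_subset_iff]
    constructor
    · exact (pvDesc_mem tree i i).2 ⟨hi, 1, pvCh_root tree i tree.length⟩
    · intro j hj
      obtain ⟨c, hcm, hcd⟩ := Finset.mem_biUnion.1 hj
      exact pvDesc_sub tree hPre hrT hi hreach ((pvCF_mem tree i c).1 hcm).2 hcd
  have h1 := Finset.card_le_card hsub
  rw [Finset.card_insert_of_notMem hnotmem, hcard] at h1
  unfold pvSz
  omega

lemma pvSz_le_n (tree : List Int) (i : Nat) : pvSz tree i ≤ tree.length := by
  unfold pvSz pvDesc
  calc ((Finset.range tree.length).filter _).card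
      ≤ (Finset.range tree.length).card := Finset.card_filter_le _ _
    _ = tree.length := Finset.card_range _

-- pushing the children of a node onto the stack: membership and measure
lemma pvPushMem (d : Nat) :
    ∀ (L : List Int) (rest : List (Int × Nat)) (e : Int × Nat),
      e ∈ L.foldl (fun st c => (c, d + 1) :: st) rest ↔
        (∃ c ∈ L, e = (c, d + 1)) ∨ e ∈ rest := by
  intro L
  induction L with
  | nil => intro rest e; simp
  | cons a t ih =>
    intro rest e
    rw [List.foldl_cons, ih]
    constructor
    · rintro (⟨c, hc, he⟩ | he)
      · exact Or.inl ⟨c, List.mem_cons_of_mem _ hc, he⟩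
      · rcases List.mem_cons.1 he with rfl | he
        · exact Or.inl ⟨a, List.mem_cons_self, rfl⟩
        · exact Or.inr he
    · rintro (⟨c, hc, he⟩ | he)
      · rcases List.mem_cons.1 hc with rfl | hc
        · subst he; exact Or.inr List.mem_cons_self
        · exact Or.inl ⟨c, hc, he⟩
      · exact Or.inr (List.mem_cons_of_mem _ he)

lemma pvMeasPush (tree : List Int) (d : Nat) :
    ∀ (L : List Int) (rest : List (Int × Nat)),
      pvMeas tree (L.foldl (fun st c => (c, d + 1) :: st) rest)
        = (L.map (fun c => pvSz tree c.toNat)).sum + pvMeas tree rest := by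
  intro L
  induction L with
  | nil => intro rest; simp [pvMeas]
  | cons a t ih =>
    intro rest
    simp only [List.foldl_cons]
    rw [ih]
    simp only [pvMeas, List.map_cons, List.sum_cons]
    omega

-- the sum of the children's subtree sizes, list form = finset form
lemma pvHelpSum (tree : List Int) (i : Nat) :
    ((pvHelpL tree tree.length i).map (fun c => pvSz tree c.toNat)).sum
      = ∑ c ∈ pvCF tree i, pvSz tree c := by
  unfold pvHelpL pvCF
  have hnd : ((List.range tree.length).filter
      (fun c => pvPar? tree c == some i)).Nodup :=
    (List.nodup_range).filter _
  rw [List.map_map, List.sum_toFinset _ hnd]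
  exact congrArg List.sum (List.map_congr_left (fun a _ => by simp))

-- the DFS result is at least the running best
lemma pvDfs_ge_best (H : List (List Int)) :
    ∀ (f : Nat) (st : List (Int × Nat)) (b : Nat), b ≤ pvDfsB H f st b := by
  intro f
  induction f with
  | zero => intro st b; exact le_rfl
  | succ f ih =>
    intro st b
    cases st with
    | nil => exact le_rfl
    | cons e rest =>
      obtain ⟨x, d⟩ := e
      show b ≤ pvDfsB H f _ (if d > b then d else b)
      calc b ≤ (if d > b then d else b) := by split <;> omega
        _ ≤ _ := ih _ _

-- soundness: the DFS never reports more than the maximal depth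
lemma pvDfs_sound (tree : List Int) (hPre : Pre_get_max_deep tree) {r : Nat}
    (hrT : pvT tree r = -1)
    (H : List (List Int))
    (hH : ∀ j, j < tree.length → H[j]? = some (pvHelpL tree tree.length j)) :
    ∀ (f : Nat) (st : List (Int × Nat)) (b : Nat),
      (∀ e ∈ st, pvOkE tree r e) → b ≤ pvM tree r →
      pvDfsB H f st b ≤ pvM tree r := by
  intro f
  induction f with
  | zero => intro st b _ hb; exact hb
  | succ f ih =>
    intro st b hok hb
    cases st with
    | nil => exact hb
    | cons e rest =>
      obtain ⟨x, d⟩ := e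
      obtain ⟨i, hx, hin, hch⟩ := hok _ List.mem_cons_self
      have hx' : x = (i : Int) := hx
      show pvDfsB H f _ (if d > b then d else b) ≤ pvM tree r
      have hdM : d ≤ pvM tree r := pvM_le tree r hin hch
      have hlook : (PySem.List.pyGet? H x).getD [] = pvHelpL tree tree.length i := by
        rw [hx', PySem.List.pyGet?_natCast, hH i hin, Option.getD_some]
      apply ih
      · intro e' he'
        rw [hlook] at he'
        rcases (pvPushMem d _ rest e').1 he' with ⟨c, hcm, hce⟩ | he'
        · obtain ⟨c', hc'n, hc'p, hc'e⟩ := (pvHelpL_mem tree tree.length i c).1 hcm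
          refine ⟨c', by rw [hce, hc'e], hc'n, ?_⟩
          rw [hce]
          exact pvChildReach tree hPre hrT hin hc'p hch
        · exact hok _ (List.mem_cons_of_mem _ he')
      · split <;> omega

-- completeness: every depth below a stack entry is eventually reported
lemma pvDfs_complete (tree : List Int) (hPre : Pre_get_max_deep tree) {r : Nat}
    (hrT : pvT tree r = -1)
    (H : List (List Int))
    (hH : ∀ j, j < tree.length → H[j]? = some (pvHelpL tree tree.length j)) :
    ∀ (f : Nat) (st : List (Int × Nat)) (b : Nat),
      (∀ e ∈ st, pvOkE tree r e) → pvMeas tree st < f →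
      ∀ (j k : Nat), j < tree.length →
        (∃ e ∈ st, ∃ i : Nat, e.1 = (i : Int) ∧
          ∃ m, pvCh tree i tree.length j = some m ∧ k = e.2 + m - 1) →
        k ≤ pvDfsB H f st b := by
  intro f
  induction f with
  | zero => intro st b _ hm; omega
  | succ f ih =>
    intro st b hok hmeas j k hj hcov
    cases st with
    | nil =>
      obtain ⟨e, he, _⟩ := hcov
      cases he
    | cons e rest =>
      obtain ⟨x, d⟩ := e
      obtain ⟨i, hx, hin, hch⟩ := hok _ List.mem_cons_self
      have hx' : x = (i : Int) := hx
      have hlook : (PySem.List.pyGet? H x).getD [] = pvHelpL tree tree.length i := by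
        rw [hx', PySem.List.pyGet?_natCast, hH i hin, Option.getD_some]
      show k ≤ pvDfsB H f
        (((PySem.List.pyGet? H x).getD []).foldl (fun st c => (c, d + 1) :: st) rest)
        (if d > b then d else b)
      have hok' : ∀ e' ∈ ((PySem.List.pyGet? H x).getD []).foldl
          (fun st c => (c, d + 1) :: st) rest, pvOkE tree r e' := by
        intro e' he'
        rw [hlook] at he'
        rcases (pvPushMem d _ rest e').1 he' with ⟨c, hcm, hce⟩ | he'
        · obtain ⟨c', hc'n, hc'p, hc'e⟩ := (pvHelpL_mem tree tree.length i c).1 hcm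
          refine ⟨c', by rw [hce, hc'e], hc'n, ?_⟩
          rw [hce]
          exact pvChildReach tree hPre hrT hin hc'p hch
        · exact hok _ (List.mem_cons_of_mem _ he')
      have hmeas' : pvMeas tree (((PySem.List.pyGet? H x).getD []).foldl
          (fun st c => (c, d + 1) :: st) rest) < f := by
        rw [hlook, pvMeasPush, pvHelpSum]
        have hszge := pvSz_ge tree hPre hrT hin hch
        have hold : pvMeas tree ((x, d) :: rest) = pvSz tree i + pvMeas tree rest := by
          simp [pvMeas, hx']
        rw [hold] at hmeas
        omega
      obtain ⟨e', he', i0, hei, m, hm, hk⟩ := hcov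
      rcases List.mem_cons.1 he' with rfl | he'
      · -- the covering entry is the popped top (x, d)
        have hii : i0 = i := by
          have : ((i0 : Nat) : Int) = ((i : Nat) : Int) := by rw [← hei, hx]
          exact_mod_cast this
        subst hii
        by_cases hm1 : m = 1
        · -- j's relative depth below i is 1: k = d, already recorded in best
          have hkd : k = d := by simp at hk; omega
        -- result ≥ best' ≥ d
          have h1 := pvDfs_ge_best H f
            (((PySem.List.pyGet? H x).getD []).foldl (fun st c => (c, d + 1) :: st) rest)
            (if d > b then d else b)
          have h2 : d ≤ (if d > b then d else b) := by split <;> omega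
          omega
        · have hm2 : 2 ≤ m := by
            have := pvCh_pos tree i0 hm; omega
          obtain ⟨c, hcn, hcp, hcc⟩ := pvSplit tree hPre i0 tree.length j m hj hm hm2
          apply ih _ _ hok' hmeas' j k hj
          refine ⟨((c : Nat), d + 1), ?_, c, rfl, m - 1, hcc, by simp at hk ⊢; omega⟩
          rw [hlook]
          apply (pvPushMem d _ rest _).2
          refine Or.inl ⟨(c : Int), ?_, rfl⟩
          exact (pvHelpL_mem tree tree.length i0 (c : Int)).2 ⟨c, hcn, hcp, rfl⟩
      · apply ih _ _ hok' hmeas' j k hj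
        refine ⟨e', ?_, i0, hei, m, hm, hk⟩
        rw [hlook]
        exact (pvPushMem d _ rest e').2 (Or.inr he')

-- B computes pvM
lemma pvAlt_eq (tree : List Int) (hPre : Pre_get_max_deep tree) {r : Nat}
    (hr : r < tree.length) (hrT : pvT tree r = -1)
    (hrootA : (pvBuildA tree).2 = some r) : get_max_deep_alt tree = (pvM tree r : Int) := by
  obtain ⟨hB1, hB2⟩ := pvBuildB_eq tree
  unfold get_max_deep_alt
  rw [hB2, hrootA]
  simp only [Option.map_some]
  rw [hB1]
  have hH : ∀ j, j < tree.length →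
      ((pvBuildA tree).1)[j]? = some (pvHelpL tree tree.length j) := by
    intro j hj
    rw [pvBuildA]
    exact (pvBuild_spec tree hPre tree.length le_rfl).2.1 j hj
  congr 1
  apply le_antisymm
  · apply pvDfs_sound tree hPre hrT (pvBuildA tree).1 hH
    · intro e he
      rcases List.mem_cons.1 he with rfl | he
      · exact ⟨r, rfl, hr, pvCh_root tree r tree.length⟩
      · cases he
    · exact Nat.le_of_lt_succ (by have := pvM_ge_one tree r; omega)
  · obtain ⟨j, hj, hjc⟩ := pvM_attained tree hPre hr
    apply pvDfs_complete tree hPre hrT (pvBuildA tree).1 hH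
    · intro e he
      rcases List.mem_cons.1 he with rfl | he
      · exact ⟨r, rfl, hr, pvCh_root tree r tree.length⟩
      · cases he
    · show pvMeas tree [((r : Int), 1)] < tree.length + 1
      have h1 : pvMeas tree [((r : Int), 1)] = pvSz tree r := by
        simp [pvMeas]
      rw [h1]
      have := pvSz_le_n tree r
      omega
    · exact hj
    · refine ⟨((r : Int), 1), List.mem_cons_self, r, rfl, pvM tree r, hjc, ?_⟩
      have := pvM_ge_one tree r
      omega

-- ===== VERDICT (by name: the statement is the Claim_ definition above) =====
theorem get_max_deep_spec : Claim_equal_get_max_deep := by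
  intro tree hDom hPre
  unfold Spec_get_max_deep
  obtain ⟨r, hroot, hr, hrT⟩ := pvRootFold_spec tree hPre
  obtain ⟨hlen, hH, h2⟩ := pvBuild_spec tree hPre tree.length le_rfl
  have hA2 : (pvBuildA tree).2 = some r := by
    rw [pvBuildA, h2]; exact hroot
  rw [pvAlt_eq tree hPre hr hrT hA2]
  unfold get_max_deep
  rw [hA2]
  have hF0 : (PySem.List.pyGet? (pvBuildA tree).1 ((r : Nat) : Int)).getD []
      = pvHelpL tree tree.length r := by
    rw [PySem.List.pyGet?_natCast]
    rw [pvBuildA, hH r hr, Option.getD_some]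
  have hParR : pvPar? tree r = none := by unfold pvPar?; rw [if_pos hrT]
  have hInv : ∀ z : Int, z ∈ pvHelpL tree tree.length r ↔
      ∃ i, i < tree.length ∧ z = (i : Int) ∧ pvCh tree r tree.length i = some (0+2) := by
    intro z
    obtain ⟨n', hn'⟩ : ∃ n', tree.length = n' + 1 := ⟨tree.length - 1, by omega⟩
    simp only [Nat.zero_add]
    rw [pvHelpL_mem]
    constructor
    · rintro ⟨i, hi, hp, hz⟩
      refine ⟨i, hi, hz, ?_⟩
      have hne : i ≠ r := by intro hh; rw [hh, hParR] at hp; cases hp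
      have hres : pvCh tree r (n'+1) i = some 2 := by
        unfold pvCh
        rw [if_neg hne, hp]
        simp [pvCh_root tree r n']
      rw [← hn'] at hres
      exact hres
    · rintro ⟨i, hi, hz, hc⟩
      have hne : i ≠ r := by
        intro hh
        have h1 : pvCh tree r tree.length i = some 1 := by
          rw [hh]; exact pvCh_root tree r tree.length
        have := pvCh_det tree r hc h1; omega
      rw [hn'] at hc
      obtain ⟨p, d0, hp, hc0, hd0⟩ := pvCh_inv tree r hne hc
      have hd1 : d0 = 1 := by omega
      have hpr : p = r := pvCh_one tree r (hd1 ▸ hc0)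
      exact ⟨i, hi, by rw [← hpr]; exact hp, hz⟩
  have hmain : pvBfsA (pvBuildA tree).1 (tree.length + 1)
      ((PySem.List.pyGet? (pvBuildA tree).1 ((r : Nat) : Int)).getD []) 1 = pvM tree r := by
    rw [hF0]
    have := pvBfs_run tree hPre hr hrT (pvBuildA tree).1 (by rw [pvBuildA]; exact hlen)
      (by intro j hj; rw [pvBuildA]; exact hH j hj) (tree.length + 1) 0
      (pvHelpL tree tree.length r) hInv (pvM_ge_one tree r)
      (by have := pvM_le_n tree hPre hr; omega)
    simpa using this
  show ((pvBfsA (pvBuildA tree).1 (tree.length + 1)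
      ((PySem.List.pyGet? (pvBuildA tree).1 ((r : Nat) : Int)).getD []) 1 : Nat) : Int)
      = ((pvM tree r : Nat) : Int)
  exact_mod_cast hmain
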